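-- pv_equiv track=rewrite | github.com/copp1723/swarm | tasks/webhook_tasks.py | _get_agent_for_calendar_event
-- ===== SOURCE A (Python) =====
-- from typing import Dict, Any, Optional
--
-- def _get_agent_for_calendar_event(event_type: str, event: Dict[str, Any]) -> str:
--     """Determine which agent should handle a calendar event"""
--     # Check event details for routing hints
--     summary = event.get('summary', '').lower()
--     description = event.get('description', '').lower()
--
--     # Route based on keywords in event
--     if any(word in summary + description for word in ['bug', 'issue', 'problem', 'error']):
--         return 'bug_01'
--     elif any(word in summary + description for word in ['deploy', 'release', 'build', 'ci/cd']):
--         return 'devops_01'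
--     elif any(word in summary + description for word in ['test', 'qa', 'quality', 'testing']):
--         return 'tester_01'
--     elif any(word in summary + description for word in ['code review', 'pr review', 'implementation']):
--         return 'coder_01'
--     elif any(word in summary + description for word in ['planning', 'product', 'feature', 'requirement']):
--         return 'product_01'
--     else:
--         return 'general_01'  # Default to General Assistant
-- ===== SOURCE B (Python) =====
-- # Different algorithm: one left-to-right scan over the text positions; at each
-- # position every keyword is tested as a prefix there and the smallest matched
-- # rule priority is accumulated; the agent is looked up by that priority at the end.
-- _AGENTS = ['bug_01', 'devops_01', 'tester_01', 'coder_01', 'product_01', 'general_01']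
-- _PRIORITY = {
--     'bug': 0, 'issue': 0, 'problem': 0, 'error': 0,
--     'deploy': 1, 'release': 1, 'build': 1, 'ci/cd': 1,
--     'test': 2, 'qa': 2, 'quality': 2, 'testing': 2,
--     'code review': 3, 'pr review': 3, 'implementation': 3,
--     'planning': 4, 'product': 4, 'feature': 4, 'requirement': 4,
-- }
--
--
-- def _get_agent_for_calendar_event(event_type: str, event) -> str:
--     text = event.get('summary', '').lower() + event.get('description', '').lower()
--     best = 5  # index into _AGENTS; 5 = default 'general_01'
--     for i in range(len(text)):
--         for kw, pri in _PRIORITY.items():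
--             if pri < best and text.startswith(kw, i):
--                 best = pri
--     return _AGENTS[best]
-- ===== Notes on version B (the rewrite author's own statement) =====
-- stated objective: alternative
-- what changed: Instead of testing each keyword for substring membership in five elif branches, B makes one left-to-right scan over the positions of the concatenated lowercased text, testing every keyword as a prefix at each position and accumulating the minimum matched rule priority, then maps that priority to the agent via a table.
import Mathlib
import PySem

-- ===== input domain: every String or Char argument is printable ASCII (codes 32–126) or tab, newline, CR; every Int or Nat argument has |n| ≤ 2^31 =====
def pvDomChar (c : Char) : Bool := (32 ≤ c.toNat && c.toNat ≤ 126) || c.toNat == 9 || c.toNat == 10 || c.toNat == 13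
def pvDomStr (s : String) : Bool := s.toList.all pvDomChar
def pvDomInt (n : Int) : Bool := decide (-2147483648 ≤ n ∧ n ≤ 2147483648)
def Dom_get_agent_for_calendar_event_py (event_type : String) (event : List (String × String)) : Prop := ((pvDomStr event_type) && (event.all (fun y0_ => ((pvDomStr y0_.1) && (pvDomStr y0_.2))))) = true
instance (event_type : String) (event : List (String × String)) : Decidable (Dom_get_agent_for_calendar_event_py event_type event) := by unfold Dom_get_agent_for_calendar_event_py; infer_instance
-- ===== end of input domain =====

-- B replaces the five elif substring-membership branches by a single scan over the
-- text's positions that accumulates the minimum matched rule priority (objective: alternative).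

-- ===== PORT A =====
def get_agent_for_calendar_event_py (event_type : String) (event : List (String × String)) : String :=
  let summary := PySem.Str.lower (PySem.Dict.getD (PySem.Dict.mk event) "summary" "")
  let description := PySem.Str.lower (PySem.Dict.getD (PySem.Dict.mk event) "description" "")
  if ["bug","issue","problem","error"].any (fun w => PySem.Str.isIn w (summary ++ description)) then "bug_01"
  else if ["deploy","release","build","ci/cd"].any (fun w => PySem.Str.isIn w (summary ++ description)) then "devops_01"
  else if ["test","qa","quality","testing"].any (fun w => PySem.Str.isIn w (summary ++ description)) then "tester_01"
  else if ["code review","pr review","implementation"].any (fun w => PySem.Str.isIn w (summary ++ description)) then "coder_01"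
  else if ["planning","product","feature","requirement"].any (fun w => PySem.Str.isIn w (summary ++ description)) then "product_01"
  else "general_01"

-- ===== PORT B =====
-- _AGENTS and _PRIORITY from Source B (the dict as its insertion-ordered item list)
def pvAgents : List String := ["bug_01", "devops_01", "tester_01", "coder_01", "product_01", "general_01"]

def pvPriority : List (String × Nat) :=
  [("bug", 0), ("issue", 0), ("problem", 0), ("error", 0),
   ("deploy", 1), ("release", 1), ("build", 1), ("ci/cd", 1),
   ("test", 2), ("qa", 2), ("quality", 2), ("testing", 2),
   ("code review", 3), ("pr review", 3), ("implementation", 3),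
   ("planning", 4), ("product", 4), ("feature", 4), ("requirement", 4)]

-- the inner 'for kw, pri in _PRIORITY.items(): if pri < best and text.startswith(kw, i): best = pri'
-- text.startswith(kw, i) for 0 ≤ i is exactly 'kw is a prefix of the i-suffix': Chars.startswith on drop
def pvInnerLoop (cs : List Char) (i : Int) (b : Nat) : Nat :=
  pvPriority.foldl
    (fun b p => if p.2 < b ∧ PySem.Chars.startswith (cs.drop i.toNat) p.1.toList = true then p.2 else b) b

-- the outer 'best = 5; for i in range(len(text)): …'
def pvBest (cs : List Char) : Nat :=
  (PySem.List.pyRange 0 (cs.length : Int) 1).foldl (fun b i => pvInnerLoop cs i b) 5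

def get_agent_for_calendar_event_py_alt (event_type : String) (event : List (String × String)) : String :=
  let text := PySem.Str.lower (PySem.Dict.getD (PySem.Dict.mk event) "summary" "")
           ++ PySem.Str.lower (PySem.Dict.getD (PySem.Dict.mk event) "description" "")
  -- _AGENTS[best]: best is always ≤ 5, so the getD default is never consulted
  pvAgents.getD (pvBest text.toList) "general_01"

-- ===== PRECONDITION & SPEC =====
def Spec_get_agent_for_calendar_event_py (event_type : String) (event : List (String × String)) (out : String) : Prop := out = get_agent_for_calendar_event_py_alt event_type event
instance (event_type : String) (event : List (String × String)) (out : String) : Decidable (Spec_get_agent_for_calendar_event_py event_type event out) := by unfold Spec_get_agent_for_calendar_event_py; infer_instance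

-- ===== CLAIM (what is proved, stated in full; the proofs are below) =====
def Claim_equal_get_agent_for_calendar_event_py : Prop := ∀ (event_type : String) (event : List (String × String)), Dom_get_agent_for_calendar_event_py event_type event → Spec_get_agent_for_calendar_event_py event_type event (get_agent_for_calendar_event_py event_type event)

-- ===== LEMMAS AND PROOFS =====

-- occurrence of a keyword (as a Prop over the character list)
abbrev pvOcc (cs : List Char) (kw : String) : Prop := PySem.Chars.isIn kw.toList cs = true

-- one cons step of the inner fold, stated explicitly (avoids defeq search)
def pvStep (cs : List Char) (i : Nat) (b : Nat) (p : String × Nat) : Nat :=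
  if p.2 < b ∧ PySem.Chars.startswith (cs.drop i) p.1.toList = true then p.2 else b

-- inner fold, generalized over the table list, with Nat position
def pvF (cs : List Char) (i : Nat) (T : List (String × Nat)) (b : Nat) : Nat :=
  T.foldl (pvStep cs i) b

lemma pvF_cons (cs : List Char) (i : Nat) (t : String × Nat) (T : List (String × Nat)) (b : Nat) :
    pvF cs i (t :: T) b = pvF cs i T (pvStep cs i b t) := by
  simp [pvF]

lemma pvStep_le (cs : List Char) (i : Nat) (b : Nat) (p : String × Nat) : pvStep cs i b p ≤ b := by
  unfold pvStep; split_ifs with h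
  · exact Nat.le_of_lt h.1
  · exact le_rfl

lemma pvF_le (cs : List Char) (i : Nat) : ∀ (T : List (String × Nat)) (b : Nat), pvF cs i T b ≤ b := by
  intro T
  induction T with
  | nil => intro b; simp [pvF]
  | cons t T ih =>
    intro b
    rw [pvF_cons]
    exact (ih _).trans (pvStep_le cs i b t)

lemma pvF_le_of_mem (cs : List Char) (i : Nat) :
    ∀ (T : List (String × Nat)) (b : Nat) (p : String × Nat), p ∈ T →
      PySem.Chars.startswith (cs.drop i) p.1.toList = true → pvF cs i T b ≤ p.2 := by
  intro T
  induction T with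
  | nil => intro b p hp; simp at hp
  | cons t T ih =>
    intro b p hp hsw
    rcases List.mem_cons.mp hp with rfl | hp
    · rw [pvF_cons]
      have hle : pvStep cs i b p ≤ p.2 := by
        unfold pvStep
        split_ifs with h
        · exact le_rfl
        · rcases Nat.lt_or_ge p.2 b with hlt | hge
          · exact absurd ⟨hlt, hsw⟩ h
          · exact hge
      exact (pvF_le cs i T _).trans hle
    · rw [pvF_cons]; exact ih _ p hp hsw

lemma pvF_cases (cs : List Char) (i : Nat) :
    ∀ (T : List (String × Nat)) (b : Nat), pvF cs i T b = b ∨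
      ∃ p ∈ T, PySem.Chars.startswith (cs.drop i) p.1.toList = true ∧ pvF cs i T b = p.2 := by
  intro T
  induction T with
  | nil => intro b; left; simp [pvF]
  | cons t T ih =>
    intro b
    rw [pvF_cons]
    have hstep : pvStep cs i b t = b ∨
        (PySem.Chars.startswith (cs.drop i) t.1.toList = true ∧ pvStep cs i b t = t.2) := by
      unfold pvStep; split_ifs with h
      · exact Or.inr ⟨h.2, rfl⟩
      · exact Or.inl rfl
    rcases ih (pvStep cs i b t) with heq | ⟨p, hp, hsw, heq⟩
    · rcases hstep with hb | ⟨hsw, ht⟩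
      · exact Or.inl (heq.trans hb)
      · exact Or.inr ⟨t, List.mem_cons_self, hsw, heq.trans ht⟩
    · exact Or.inr ⟨p, List.mem_cons_of_mem _ hp, hsw, heq⟩

-- outer fold over Nat positions
def pvG (cs : List Char) (is : List Nat) (b : Nat) : Nat :=
  is.foldl (fun b i => pvF cs i pvPriority b) b

lemma pvG_cons (cs : List Char) (j : Nat) (is : List Nat) (b : Nat) :
    pvG cs (j :: is) b = pvG cs is (pvF cs j pvPriority b) := by
  simp [pvG]

lemma pvG_le (cs : List Char) : ∀ (is : List Nat) (b : Nat), pvG cs is b ≤ b := by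
  intro is
  induction is with
  | nil => intro b; simp [pvG]
  | cons i is ih =>
    intro b
    rw [pvG_cons]
    exact (ih _).trans (pvF_le cs i pvPriority b)

lemma pvG_le_of_mem (cs : List Char) :
    ∀ (is : List Nat) (b : Nat) (i : Nat), i ∈ is → ∀ (p : String × Nat), p ∈ pvPriority →
      PySem.Chars.startswith (cs.drop i) p.1.toList = true → pvG cs is b ≤ p.2 := by
  intro is
  induction is with
  | nil => intro b i hi; simp at hi
  | cons j is ih =>
    intro b i hi p hp hsw
    rcases List.mem_cons.mp hi with rfl | hi
    · rw [pvG_cons]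
      exact (pvG_le cs is _).trans (pvF_le_of_mem cs i pvPriority b p hp hsw)
    · rw [pvG_cons]; exact ih _ i hi p hp hsw

lemma pvG_cases (cs : List Char) :
    ∀ (is : List Nat) (b : Nat), pvG cs is b = b ∨
      ∃ i ∈ is, ∃ p ∈ pvPriority, PySem.Chars.startswith (cs.drop i) p.1.toList = true ∧ pvG cs is b = p.2 := by
  intro is
  induction is with
  | nil => intro b; left; simp [pvG]
  | cons j is ih =>
    intro b
    rw [pvG_cons]
    rcases ih (pvF cs j pvPriority b) with heq | ⟨i, hi, p, hp, hsw, heq⟩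
    · rcases pvF_cases cs j pvPriority b with heq' | ⟨p, hp, hsw, heq'⟩
      · left; exact heq.trans heq'
      · right; exact ⟨j, List.mem_cons_self, p, hp, hsw, heq.trans heq'⟩
    · right; exact ⟨i, List.mem_cons_of_mem _ hi, p, hp, hsw, heq⟩

-- pvBest in terms of pvG over List.range
lemma pvBest_eq_pvG (cs : List Char) : pvBest cs = pvG cs (List.range cs.length) 5 := by
  unfold pvBest pvG pvInnerLoop pvF pvStep
  rw [PySem.List.pyRange_one, List.foldl_map]
  simp only [Int.sub_zero, Int.toNat_natCast, zero_add]

-- occurrence bridge: a nonempty keyword occurs iff it starts at some position < length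
lemma pvOcc_iff (cs : List Char) (kw : String) (hne : kw.toList ≠ []) :
    pvOcc cs kw ↔ ∃ i ∈ List.range cs.length, PySem.Chars.startswith (cs.drop i) kw.toList = true := by
  constructor
  · intro h
    obtain ⟨j, hj⟩ := (PySem.Chars.exists_prefix_drop_iff_isIn kw.toList cs).mpr h
    have hjlt : j < cs.length := by
      by_contra hge
      have : cs.drop j = [] := List.drop_eq_nil_of_le (by omega)
      rw [this] at hj
      exact hne (List.prefix_nil.mp hj)
    exact ⟨j, List.mem_range.mpr hjlt, (PySem.Chars.startswith_iff _ _).mpr hj⟩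
  · rintro ⟨i, _, hsw⟩
    exact (PySem.Chars.exists_prefix_drop_iff_isIn kw.toList cs).mp
      ⟨i, (PySem.Chars.startswith_iff _ _).mp hsw⟩

lemma pvBest_le_of_occ (cs : List Char) (kw : String) (pri : Nat)
    (hmem : (kw, pri) ∈ pvPriority) (hocc : pvOcc cs kw) : pvBest cs ≤ pri := by
  have hne : kw.toList ≠ [] := by
    revert hmem; unfold pvPriority; intro hmem
    fin_cases hmem <;> decide
  obtain ⟨i, hi, hsw⟩ := (pvOcc_iff cs kw hne).mp hocc
  rw [pvBest_eq_pvG]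
  exact pvG_le_of_mem cs _ 5 i hi (kw, pri) hmem hsw

lemma pvBest_cases (cs : List Char) :
    pvBest cs = 5 ∨ ∃ p ∈ pvPriority, pvOcc cs p.1 ∧ pvBest cs = p.2 := by
  rw [pvBest_eq_pvG]
  rcases pvG_cases cs (List.range cs.length) 5 with heq | ⟨i, hi, p, hp, hsw, heq⟩
  · exact Or.inl heq
  · right
    refine ⟨p, hp, ?_, heq⟩
    exact (PySem.Chars.exists_prefix_drop_iff_isIn p.1.toList cs).mp
      ⟨i, (PySem.Chars.startswith_iff _ _).mp hsw⟩

-- memberships of the table entries (structural, no string comparison)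
lemma pvMem0 : ("bug", (0 : Nat)) ∈ pvPriority := List.mem_cons_self
lemma pvMem1 : ("issue", (0 : Nat)) ∈ pvPriority := List.mem_cons_of_mem _ (List.mem_cons_self)
lemma pvMem2 : ("problem", (0 : Nat)) ∈ pvPriority := List.mem_cons_of_mem _ (List.mem_cons_of_mem _ (List.mem_cons_self))
lemma pvMem3 : ("error", (0 : Nat)) ∈ pvPriority := List.mem_cons_of_mem _ (List.mem_cons_of_mem _ (List.mem_cons_of_mem _ (List.mem_cons_self)))
lemma pvMem4 : ("deploy", (1 : Nat)) ∈ pvPriority := List.mem_cons_of_mem _ (List.mem_cons_of_mem _ (List.mem_cons_of_mem _ (List.mem_cons_of_mem _ (List.mem_cons_self))))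
lemma pvMem5 : ("release", (1 : Nat)) ∈ pvPriority := List.mem_cons_of_mem _ (List.mem_cons_of_mem _ (List.mem_cons_of_mem _ (List.mem_cons_of_mem _ (List.mem_cons_of_mem _ (List.mem_cons_self)))))
lemma pvMem6 : ("build", (1 : Nat)) ∈ pvPriority := List.mem_cons_of_mem _ (List.mem_cons_of_mem _ (List.mem_cons_of_mem _ (List.mem_cons_of_mem _ (List.mem_cons_of_mem _ (List.mem_cons_of_mem _ (List.mem_cons_self))))))
lemma pvMem7 : ("ci/cd", (1 : Nat)) ∈ pvPriority := List.mem_cons_of_mem _ (List.mem_cons_of_mem _ (List.mem_cons_of_mem _ (List.mem_cons_of_mem _ (List.mem_cons_of_mem _ (List.mem_cons_of_mem _ (List.mem_cons_of_mem _ (List.mem_cons_self)))))))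
lemma pvMem8 : ("test", (2 : Nat)) ∈ pvPriority := List.mem_cons_of_mem _ (List.mem_cons_of_mem _ (List.mem_cons_of_mem _ (List.mem_cons_of_mem _ (List.mem_cons_of_mem _ (List.mem_cons_of_mem _ (List.mem_cons_of_mem _ (List.mem_cons_of_mem _ (List.mem_cons_self))))))))
lemma pvMem9 : ("qa", (2 : Nat)) ∈ pvPriority := List.mem_cons_of_mem _ (List.mem_cons_of_mem _ (List.mem_cons_of_mem _ (List.mem_cons_of_mem _ (List.mem_cons_of_mem _ (List.mem_cons_of_mem _ (List.mem_cons_of_mem _ (List.mem_cons_of_mem _ (List.mem_cons_of_mem _ (List.mem_cons_self)))))))))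
lemma pvMem10 : ("quality", (2 : Nat)) ∈ pvPriority := List.mem_cons_of_mem _ (List.mem_cons_of_mem _ (List.mem_cons_of_mem _ (List.mem_cons_of_mem _ (List.mem_cons_of_mem _ (List.mem_cons_of_mem _ (List.mem_cons_of_mem _ (List.mem_cons_of_mem _ (List.mem_cons_of_mem _ (List.mem_cons_of_mem _ (List.mem_cons_self))))))))))
lemma pvMem11 : ("testing", (2 : Nat)) ∈ pvPriority := List.mem_cons_of_mem _ (List.mem_cons_of_mem _ (List.mem_cons_of_mem _ (List.mem_cons_of_mem _ (List.mem_cons_of_mem _ (List.mem_cons_of_mem _ (List.mem_cons_of_mem _ (List.mem_cons_of_mem _ (List.mem_cons_of_mem _ (List.mem_cons_of_mem _ (List.mem_cons_of_mem _ (List.mem_cons_self)))))))))))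
lemma pvMem12 : ("code review", (3 : Nat)) ∈ pvPriority := List.mem_cons_of_mem _ (List.mem_cons_of_mem _ (List.mem_cons_of_mem _ (List.mem_cons_of_mem _ (List.mem_cons_of_mem _ (List.mem_cons_of_mem _ (List.mem_cons_of_mem _ (List.mem_cons_of_mem _ (List.mem_cons_of_mem _ (List.mem_cons_of_mem _ (List.mem_cons_of_mem _ (List.mem_cons_of_mem _ (List.mem_cons_self))))))))))))
lemma pvMem13 : ("pr review", (3 : Nat)) ∈ pvPriority := List.mem_cons_of_mem _ (List.mem_cons_of_mem _ (List.mem_cons_of_mem _ (List.mem_cons_of_mem _ (List.mem_cons_of_mem _ (List.mem_cons_of_mem _ (List.mem_cons_of_mem _ (List.mem_cons_of_mem _ (List.mem_cons_of_mem _ (List.mem_cons_of_mem _ (List.mem_cons_of_mem _ (List.mem_cons_of_mem _ (List.mem_cons_of_mem _ (List.mem_cons_self)))))))))))))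
lemma pvMem14 : ("implementation", (3 : Nat)) ∈ pvPriority := List.mem_cons_of_mem _ (List.mem_cons_of_mem _ (List.mem_cons_of_mem _ (List.mem_cons_of_mem _ (List.mem_cons_of_mem _ (List.mem_cons_of_mem _ (List.mem_cons_of_mem _ (List.mem_cons_of_mem _ (List.mem_cons_of_mem _ (List.mem_cons_of_mem _ (List.mem_cons_of_mem _ (List.mem_cons_of_mem _ (List.mem_cons_of_mem _ (List.mem_cons_of_mem _ (List.mem_cons_self))))))))))))))
lemma pvMem15 : ("planning", (4 : Nat)) ∈ pvPriority := List.mem_cons_of_mem _ (List.mem_cons_of_mem _ (List.mem_cons_of_mem _ (List.mem_cons_of_mem _ (List.mem_cons_of_mem _ (List.mem_cons_of_mem _ (List.mem_cons_of_mem _ (List.mem_cons_of_mem _ (List.mem_cons_of_mem _ (List.mem_cons_of_mem _ (List.mem_cons_of_mem _ (List.mem_cons_of_mem _ (List.mem_cons_of_mem _ (List.mem_cons_of_mem _ (List.mem_cons_of_mem _ (List.mem_cons_self)))))))))))))))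
lemma pvMem16 : ("product", (4 : Nat)) ∈ pvPriority := List.mem_cons_of_mem _ (List.mem_cons_of_mem _ (List.mem_cons_of_mem _ (List.mem_cons_of_mem _ (List.mem_cons_of_mem _ (List.mem_cons_of_mem _ (List.mem_cons_of_mem _ (List.mem_cons_of_mem _ (List.mem_cons_of_mem _ (List.mem_cons_of_mem _ (List.mem_cons_of_mem _ (List.mem_cons_of_mem _ (List.mem_cons_of_mem _ (List.mem_cons_of_mem _ (List.mem_cons_of_mem _ (List.mem_cons_of_mem _ (List.mem_cons_self))))))))))))))))
lemma pvMem17 : ("feature", (4 : Nat)) ∈ pvPriority := List.mem_cons_of_mem _ (List.mem_cons_of_mem _ (List.mem_cons_of_mem _ (List.mem_cons_of_mem _ (List.mem_cons_of_mem _ (List.mem_cons_of_mem _ (List.mem_cons_of_mem _ (List.mem_cons_of_mem _ (List.mem_cons_of_mem _ (List.mem_cons_of_mem _ (List.mem_cons_of_mem _ (List.mem_cons_of_mem _ (List.mem_cons_of_mem _ (List.mem_cons_of_mem _ (List.mem_cons_of_mem _ (List.mem_cons_of_mem _ (List.mem_cons_of_mem _ (List.mem_cons_self)))))))))))))))))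
lemma pvMem18 : ("requirement", (4 : Nat)) ∈ pvPriority := List.mem_cons_of_mem _ (List.mem_cons_of_mem _ (List.mem_cons_of_mem _ (List.mem_cons_of_mem _ (List.mem_cons_of_mem _ (List.mem_cons_of_mem _ (List.mem_cons_of_mem _ (List.mem_cons_of_mem _ (List.mem_cons_of_mem _ (List.mem_cons_of_mem _ (List.mem_cons_of_mem _ (List.mem_cons_of_mem _ (List.mem_cons_of_mem _ (List.mem_cons_of_mem _ (List.mem_cons_of_mem _ (List.mem_cons_of_mem _ (List.mem_cons_of_mem _ (List.mem_cons_of_mem _ (List.mem_cons_self))))))))))))))))))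

-- lower bound: if no rule of priority < g matches, pvBest is at least g
lemma pvBest_ge (cs : List Char) (g : Nat) (hg : g ≤ 5)
    (hno : ∀ p ∈ pvPriority, p.2 < g → ¬ pvOcc cs p.1) : g ≤ pvBest cs := by
  rcases pvBest_cases cs with heq | ⟨p, hp, hocc, heq⟩
  · omega
  · rw [heq]
    by_contra hlt
    exact hno p hp (by omega) hocc

-- the characterization of pvBest as the elif chain
set_option maxHeartbeats 4000000 in
lemma pvBest_eq_chain (cs : List Char) :
    pvBest cs =
      (if pvOcc cs "bug" ∨ pvOcc cs "issue" ∨ pvOcc cs "problem" ∨ pvOcc cs "error" then 0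
       else if pvOcc cs "deploy" ∨ pvOcc cs "release" ∨ pvOcc cs "build" ∨ pvOcc cs "ci/cd" then 1
       else if pvOcc cs "test" ∨ pvOcc cs "qa" ∨ pvOcc cs "quality" ∨ pvOcc cs "testing" then 2
       else if pvOcc cs "code review" ∨ pvOcc cs "pr review" ∨ pvOcc cs "implementation" then 3
       else if pvOcc cs "planning" ∨ pvOcc cs "product" ∨ pvOcc cs "feature" ∨ pvOcc cs "requirement" then 4
       else 5) := by
  have hub : ∀ kw pri, (kw, pri) ∈ pvPriority → pvOcc cs kw → pvBest cs ≤ pri :=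
    fun kw pri => pvBest_le_of_occ cs kw pri
  split_ifs with h0 h1 h2 h3 h4
  · rcases h0 with h | h | h | h
    · exact Nat.le_zero.mp (hub _ 0 pvMem0 h)
    · exact Nat.le_zero.mp (hub _ 0 pvMem1 h)
    · exact Nat.le_zero.mp (hub _ 0 pvMem2 h)
    · exact Nat.le_zero.mp (hub _ 0 pvMem3 h)
  · push_neg at h0
    obtain ⟨n1, n2, n3, n4⟩ := h0
    refine le_antisymm ?_ (pvBest_ge cs 1 (by omega) ?_)
    · rcases h1 with h | h | h | h
      · exact hub _ 1 pvMem4 h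
      · exact hub _ 1 pvMem5 h
      · exact hub _ 1 pvMem6 h
      · exact hub _ 1 pvMem7 h
    · intro p hp hlt
      simp only [pvPriority, List.mem_cons, List.not_mem_nil, or_false] at hp
      rcases hp with rfl|rfl|rfl|rfl|rfl|rfl|rfl|rfl|rfl|rfl|rfl|rfl|rfl|rfl|rfl|rfl|rfl|rfl|rfl
      · exact n1
      · exact n2
      · exact n3
      · exact n4
      · exact absurd hlt (by decide)
      · exact absurd hlt (by decide)
      · exact absurd hlt (by decide)
      · exact absurd hlt (by decide)
      · exact absurd hlt (by decide)
      · exact absurd hlt (by decide)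
      · exact absurd hlt (by decide)
      · exact absurd hlt (by decide)
      · exact absurd hlt (by decide)
      · exact absurd hlt (by decide)
      · exact absurd hlt (by decide)
      · exact absurd hlt (by decide)
      · exact absurd hlt (by decide)
      · exact absurd hlt (by decide)
      · exact absurd hlt (by decide)
  · push_neg at h0 h1
    obtain ⟨n1, n2, n3, n4⟩ := h0
    obtain ⟨m1, m2, m3, m4⟩ := h1
    refine le_antisymm ?_ (pvBest_ge cs 2 (by omega) ?_)
    · rcases h2 with h | h | h | h
      · exact hub _ 2 pvMem8 h
      · exact hub _ 2 pvMem9 h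
      · exact hub _ 2 pvMem10 h
      · exact hub _ 2 pvMem11 h
    · intro p hp hlt
      simp only [pvPriority, List.mem_cons, List.not_mem_nil, or_false] at hp
      rcases hp with rfl|rfl|rfl|rfl|rfl|rfl|rfl|rfl|rfl|rfl|rfl|rfl|rfl|rfl|rfl|rfl|rfl|rfl|rfl
      · exact n1
      · exact n2
      · exact n3
      · exact n4
      · exact m1
      · exact m2
      · exact m3
      · exact m4
      · exact absurd hlt (by decide)
      · exact absurd hlt (by decide)
      · exact absurd hlt (by decide)
      · exact absurd hlt (by decide)
      · exact absurd hlt (by decide)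
      · exact absurd hlt (by decide)
      · exact absurd hlt (by decide)
      · exact absurd hlt (by decide)
      · exact absurd hlt (by decide)
      · exact absurd hlt (by decide)
      · exact absurd hlt (by decide)
  · push_neg at h0 h1 h2
    obtain ⟨n1, n2, n3, n4⟩ := h0
    obtain ⟨m1, m2, m3, m4⟩ := h1
    obtain ⟨o1, o2, o3, o4⟩ := h2
    refine le_antisymm ?_ (pvBest_ge cs 3 (by omega) ?_)
    · rcases h3 with h | h | h
      · exact hub _ 3 pvMem12 h
      · exact hub _ 3 pvMem13 h
      · exact hub _ 3 pvMem14 h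
    · intro p hp hlt
      simp only [pvPriority, List.mem_cons, List.not_mem_nil, or_false] at hp
      rcases hp with rfl|rfl|rfl|rfl|rfl|rfl|rfl|rfl|rfl|rfl|rfl|rfl|rfl|rfl|rfl|rfl|rfl|rfl|rfl
      · exact n1
      · exact n2
      · exact n3
      · exact n4
      · exact m1
      · exact m2
      · exact m3
      · exact m4
      · exact o1
      · exact o2
      · exact o3
      · exact o4
      · exact absurd hlt (by decide)
      · exact absurd hlt (by decide)
      · exact absurd hlt (by decide)
      · exact absurd hlt (by decide)
      · exact absurd hlt (by decide)
      · exact absurd hlt (by decide)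
      · exact absurd hlt (by decide)
  · push_neg at h0 h1 h2 h3
    obtain ⟨n1, n2, n3, n4⟩ := h0
    obtain ⟨m1, m2, m3, m4⟩ := h1
    obtain ⟨o1, o2, o3, o4⟩ := h2
    obtain ⟨q1, q2, q3⟩ := h3
    refine le_antisymm ?_ (pvBest_ge cs 4 (by omega) ?_)
    · rcases h4 with h | h | h | h
      · exact hub _ 4 pvMem15 h
      · exact hub _ 4 pvMem16 h
      · exact hub _ 4 pvMem17 h
      · exact hub _ 4 pvMem18 h
    · intro p hp hlt
      simp only [pvPriority, List.mem_cons, List.not_mem_nil, or_false] at hp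
      rcases hp with rfl|rfl|rfl|rfl|rfl|rfl|rfl|rfl|rfl|rfl|rfl|rfl|rfl|rfl|rfl|rfl|rfl|rfl|rfl
      · exact n1
      · exact n2
      · exact n3
      · exact n4
      · exact m1
      · exact m2
      · exact m3
      · exact m4
      · exact o1
      · exact o2
      · exact o3
      · exact o4
      · exact q1
      · exact q2
      · exact q3
      · exact absurd hlt (by decide)
      · exact absurd hlt (by decide)
      · exact absurd hlt (by decide)
      · exact absurd hlt (by decide)
  · push_neg at h0 h1 h2 h3 h4
    obtain ⟨n1, n2, n3, n4⟩ := h0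
    obtain ⟨m1, m2, m3, m4⟩ := h1
    obtain ⟨o1, o2, o3, o4⟩ := h2
    obtain ⟨q1, q2, q3⟩ := h3
    obtain ⟨r1, r2, r3, r4⟩ := h4
    refine le_antisymm ?_ (pvBest_ge cs 5 le_rfl ?_)
    · rw [pvBest_eq_pvG]; exact pvG_le cs _ 5
    · intro p hp hlt
      simp only [pvPriority, List.mem_cons, List.not_mem_nil, or_false] at hp
      rcases hp with rfl|rfl|rfl|rfl|rfl|rfl|rfl|rfl|rfl|rfl|rfl|rfl|rfl|rfl|rfl|rfl|rfl|rfl|rfl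
      · exact n1
      · exact n2
      · exact n3
      · exact n4
      · exact m1
      · exact m2
      · exact m3
      · exact m4
      · exact o1
      · exact o2
      · exact o3
      · exact o4
      · exact q1
      · exact q2
      · exact q3
      · exact r1
      · exact r2
      · exact r3
      · exact r4

-- ===== VERDICT (by name: the statement is the Claim_ definition above) =====
theorem get_agent_for_calendar_event_py_spec : Claim_equal_get_agent_for_calendar_event_py := by
  intro event_type event _
  unfold Spec_get_agent_for_calendar_event_py
  unfold get_agent_for_calendar_event_py get_agent_for_calendar_event_py_alt
  simp only []
  rw [pvBest_eq_chain]
  simp only [List.any_cons, List.any_nil, Bool.or_false, Bool.or_eq_true,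
    PySem.Str.isIn_eq, pvOcc]
  split_ifs <;> rfl
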